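-- pv_equiv track=rewrite | github.com/youngDaLee/Daily-Algorithm | programmers/stack_queue/주식가격.py | solution
-- ===== SOURCE A (Python) =====
-- def solution(prices):
--     answer = []
--     stack = []
--     for i in range(0, len(prices)):
--         cnt = 0
--         stack.append(prices[i])
--         for j in range(i, len(prices)):
--             if stack[-1] > prices[j] or j+1==len(prices) :
--                 answer.append(cnt)
--                 break
--             cnt = cnt+1
--
--     return answer
-- ===== SOURCE B (Python) =====
-- def solution(prices):
--     n = len(prices)
--     answer = [0] * n
--     stack = []
--     for i, p in enumerate(prices):
--         while stack and prices[stack[-1]] > p: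
--             j = stack.pop()
--             answer[j] = i - j
--         stack.append(i)
--     for j in stack:
--         answer[j] = n - 1 - j
--     return answer
-- ===== Notes on version B (the rewrite author's own statement) =====
-- stated objective: faster
-- what changed: Replaced the per-index rescan of the suffix by a single pass with a monotonic stack of indices (each index pushed and popped once), settling remaining indices at the end.
import Mathlib
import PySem

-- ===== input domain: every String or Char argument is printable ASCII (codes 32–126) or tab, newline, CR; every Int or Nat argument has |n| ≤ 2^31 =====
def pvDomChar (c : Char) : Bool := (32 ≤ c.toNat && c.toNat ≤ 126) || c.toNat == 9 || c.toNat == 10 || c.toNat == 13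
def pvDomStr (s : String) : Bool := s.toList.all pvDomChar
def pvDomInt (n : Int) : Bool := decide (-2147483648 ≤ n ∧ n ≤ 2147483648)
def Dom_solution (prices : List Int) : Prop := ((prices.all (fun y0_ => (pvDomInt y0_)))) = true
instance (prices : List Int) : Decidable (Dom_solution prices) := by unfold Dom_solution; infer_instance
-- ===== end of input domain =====

-- B replaces A's O(n^2) per-index rescan by one O(n) pass with a monotonic stack of indices.

-- ===== PORT A =====
-- inner 'for j in range(i, len(prices))' loop with its break; indices j are always in range,
-- so prices[j] is ported as getD (exact here).
def innerA (prices : List Int) (n : Nat) (top : Int) : List Nat → Int → Option Int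
  | [], _ => none
  | j :: rest, cnt =>
    if top > prices.getD j 0 ∨ j + 1 = n then some cnt
    else innerA prices n top rest (cnt + 1)

def solution (prices : List Int) : List Int :=
  let n := prices.length
  let st := (List.range n).foldl (fun (st : List Int × List Int) i =>
    let stack := st.2 ++ [prices.getD i 0]      -- stack.append(prices[i]); stack[-1] = getLastD
    match innerA prices n (stack.getLastD 0) (List.range' i (n - i)) 0 with
    | some cnt => (st.1 ++ [cnt], stack)
    | none => (st.1, stack)) ([], [])
  st.1

-- ===== PORT B =====
-- the 'while stack and prices[stack[-1]] > p' loop; the Python stack's top (its last element)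
-- is the HEAD of this list.
def popLoop (prices : List Int) (i : Nat) (p : Int) : List Nat → List Int → List Nat × List Int
  | [], ans => ([], ans)
  | j :: rest, ans =>
    if prices.getD j 0 > p then popLoop prices i p rest (ans.set j ((i : Int) - (j : Int)))
    else (j :: rest, ans)

def solution_alt (prices : List Int) : List Int :=
  let n := prices.length
  let st := (List.range n).foldl (fun (st : List Nat × List Int) i =>
    let res := popLoop prices i (prices.getD i 0) st.1 st.2
    (i :: res.1, res.2)) ([], List.replicate n 0)
  st.1.foldl (fun ans j => ans.set j ((n : Int) - 1 - (j : Int))) st.2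

-- ===== PRECONDITION & SPEC =====
def Spec_solution (prices : List Int) (out : List Int) : Prop := out = solution_alt prices
instance (prices : List Int) (out : List Int) : Decidable (Spec_solution prices out) := by unfold Spec_solution; infer_instance

-- ===== CLAIM (what is proved, stated in full; the proofs are below) =====
def Claim_equal_solution : Prop := ∀ (prices : List Int), Dom_solution prices → Spec_solution prices (solution prices)

-- ===== LEMMAS AND PROOFS =====

-- the common specification: seconds until the price at index j first drops (strictly),
-- capped at the last index.
def specv (prices : List Int) (j : Nat) : Int :=
  match (List.range' (j+1) (prices.length - (j+1))).find?
      (fun k => prices.getD k 0 < prices.getD j 0) with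
  | some k => (k : Int) - (j : Int)
  | none => (prices.length : Int) - 1 - (j : Int)

-- "no strict drop below prices[j] at any index in (j, i)"
def nodropB (prices : List Int) (j i : Nat) : Bool :=
  (List.range' (j+1) (i - (j+1))).all (fun k => prices.getD j 0 ≤ prices.getD k 0)

def stInv (prices : List Int) (i : Nat) : List Nat :=
  ((List.range i).filter (fun j => nodropB prices j i)).reverse

def ansInv (prices : List Int) (n i : Nat) : List Int :=
  (List.range n).map (fun j => if j < i ∧ nodropB prices j i = false then specv prices j else 0)

theorem innerA_eq (prices : List Int) (n : Nat) (x : Int) :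
    ∀ fuel j cnt, j < n → n - j = fuel →
    innerA prices n x (List.range' j fuel) cnt =
      some (match (List.range' j fuel).find? (fun k => prices.getD k 0 < x) with
            | some k => cnt + ((k : Int) - (j : Int))
            | none => cnt + ((n : Int) - 1 - (j : Int))) := by
  intro fuel
  induction fuel with
  | zero => intro j cnt hj hf; omega
  | succ fuel ih =>
    intro j cnt hj hf
    rw [List.range'_succ]
    by_cases h1 : prices.getD j 0 < x
    · simp only [innerA]
      rw [if_pos (Or.inl h1), List.find?_cons_of_pos (by simpa using h1)]
      simp
    · by_cases h2 : j + 1 = n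
      · have hf0 : fuel = 0 := by omega
        subst hf0
        simp only [innerA]
        rw [if_pos (Or.inr h2), List.find?_cons_of_neg (by simpa using h1),
          List.range'_zero, List.find?_nil]
        congr 1
        show cnt = cnt + ((n : Int) - 1 - (j : Int))
        omega
      · have hlt : j + 1 < n := by omega
        have hrec := ih (j + 1) (cnt + 1) hlt (by omega)
        simp only [innerA]
        rw [if_neg (by tauto), hrec, List.find?_cons_of_neg (by simpa using h1)]
        cases hfind : List.find? (fun k => decide (prices.getD k 0 < x)) (List.range' (j + 1) fuel) with
        | none => congr 1; push_cast; ring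
        | some k => congr 1; push_cast; ring

theorem solution_eq_spec (prices : List Int) :
    solution prices = (List.range prices.length).map (specv prices) := by
  have main : ∀ (l : List Nat), (∀ i ∈ l, i < prices.length) → ∀ (ans stack : List Int),
      ((l.foldl (fun (st : List Int × List Int) i =>
        let stack := st.2 ++ [prices.getD i 0]
        match innerA prices prices.length (stack.getLastD 0) (List.range' i (prices.length - i)) 0 with
        | some cnt => (st.1 ++ [cnt], stack)
        | none => (st.1, stack)) (ans, stack)).1) = ans ++ l.map (specv prices) := by
    intro l
    induction l with
    | nil => intro _ ans stack; simp
    | cons i l ihl =>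
      intro hmem ans stack
      have hi : i < prices.length := hmem i (List.mem_cons_self ..)
      have hfuel : prices.length - i = (prices.length - (i + 1)) + 1 := by omega
      simp only [List.foldl_cons]
      rw [List.getLastD_concat,
        innerA_eq prices prices.length (prices.getD i 0) (prices.length - i) i 0 hi rfl]
      have hsplit : List.range' i (prices.length - i) = i :: List.range' (i + 1) (prices.length - (i + 1)) := by
        rw [hfuel, List.range'_succ]
      rw [hsplit, List.find?_cons_of_neg (by simp)]
      have hv : (match List.find? (fun k => decide (prices.getD k 0 < prices.getD i 0))
            (List.range' (i + 1) (prices.length - (i + 1))) with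
          | some k => (0 : Int) + ((k : Int) - (i : Int))
          | none => (0 : Int) + ((prices.length : Int) - 1 - (i : Int))) = specv prices i := by
        unfold specv
        cases hfind : List.find? (fun k => decide (prices.getD k 0 < prices.getD i 0))
            (List.range' (i + 1) (prices.length - (i + 1))) with
        | none => simp
        | some k => simp
      rw [hv]
      rw [ihl (fun a ha => hmem a (List.mem_cons_of_mem _ ha)) (ans ++ [specv prices i]) (stack ++ [prices.getD i 0])]
      simp
  simp only [solution]
  have := main (List.range prices.length) (by simp) [] []
  simpa using this

theorem popLoop_tw (prices : List Int) (i : Nat) (p : Int) :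
    ∀ (s : List Nat) (ans : List Int),
    popLoop prices i p s ans =
      (s.dropWhile (fun j => decide (prices.getD j 0 > p)),
       (s.takeWhile (fun j => decide (prices.getD j 0 > p))).foldl
         (fun a j => a.set j ((i : Int) - (j : Int))) ans) := by
  intro s
  induction s with
  | nil => intro ans; simp [popLoop]
  | cons j rest ih =>
    intro ans
    by_cases h : prices.getD j 0 > p
    · rw [popLoop, if_pos h, ih, List.dropWhile_cons_of_pos (by simpa using h),
        List.takeWhile_cons_of_pos (by simpa using h), List.foldl_cons]
    · rw [popLoop, if_neg h, List.dropWhile_cons_of_neg (by simpa using h),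
        List.takeWhile_cons_of_neg (by simpa using h), List.foldl_nil]

theorem dw_tw_filter {α : Type} (f : α → Bool) :
    ∀ (s : List α), List.Pairwise (fun a b => f a = false → f b = false) s →
    s.dropWhile f = s.filter (fun x => !f x) ∧ s.takeWhile f = s.filter f := by
  intro s
  induction s with
  | nil => intro _; simp
  | cons a s ih =>
    intro hp
    rcases List.pairwise_cons.mp hp with ⟨ha, hs⟩
    rcases ih hs with ⟨ihd, iht⟩
    cases hfa : f a with
    | false =>
      constructor
      · rw [List.dropWhile_cons_of_neg (by simp [hfa]),
          List.filter_cons_of_pos (by simp [hfa]), eq_comm]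
        have : s.filter (fun x => !f x) = s := List.filter_eq_self.mpr (by
          intro b hb; simp [ha b hb hfa])
        rw [this]
      · rw [List.takeWhile_cons_of_neg (by simp [hfa]),
          List.filter_cons_of_neg (by simp [hfa]), eq_comm, List.filter_eq_nil_iff]
        intro b hb; simp [ha b hb hfa]
    | true =>
      constructor
      · rw [List.dropWhile_cons_of_pos (by simp [hfa]),
          List.filter_cons_of_neg (by simp [hfa]), ihd]
      · rw [List.takeWhile_cons_of_pos (by simp [hfa]),
          List.filter_cons_of_pos (by simp [hfa]), iht]

theorem foldl_set_length (g : Nat → Int) :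
    ∀ (L : List Nat) (a : List Int),
    (L.foldl (fun a j => a.set j (g j)) a).length = a.length := by
  intro L
  induction L with
  | nil => intro a; rfl
  | cons j L ih => intro a; rw [List.foldl_cons, ih, List.length_set]

theorem foldl_set_getD (g : Nat → Int) :
    ∀ (L : List Nat) (a : List Int) (k : Nat), L.Nodup → k < a.length →
    (L.foldl (fun a j => a.set j (g j)) a).getD k 0 =
      if k ∈ L then g k else a.getD k 0 := by
  intro L
  induction L with
  | nil => intro a k _ _; simp
  | cons j L ih =>
    intro a k hnd hk
    rcases List.nodup_cons.mp hnd with ⟨hj, hL⟩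
    rw [List.foldl_cons, ih _ _ hL (by simpa using hk)]
    by_cases hkL : k ∈ L
    · rw [if_pos hkL, if_pos (List.mem_cons_of_mem _ hkL)]
    · rw [if_neg hkL]
      by_cases hkj : k = j
      · subst hkj
        rw [if_pos (List.mem_cons_self ..), List.getD_eq_getElem?_getD,
          List.getElem?_set, if_pos rfl, if_pos hk]
        rfl
      · rw [if_neg (by simp [hkj, hkL]), List.getD_eq_getElem?_getD, List.getElem?_set,
          if_neg (fun h => hkj h.symm), ← List.getD_eq_getElem?_getD]

theorem nodropB_le (prices : List Int) (j i k : Nat) (h : nodropB prices j i = true)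
    (h1 : j < k) (h2 : k < i) : prices.getD j 0 ≤ prices.getD k 0 := by
  have hk : k ∈ List.range' (j+1) (i-(j+1)) := by
    rw [List.mem_range'_1]; omega
  simpa using (List.all_eq_true.mp h) k hk

theorem nodropB_succ (prices : List Int) (j i : Nat) (hj : j < i) :
    nodropB prices j (i+1) = (nodropB prices j i && decide (prices.getD j 0 ≤ prices.getD i 0)) := by
  unfold nodropB
  have h1 : i + 1 - (j+1) = (i - (j+1)) + 1 := by omega
  rw [h1, List.range'_concat]
  have h2 : j + 1 + 1 * (i - (j+1)) = i := by omega
  rw [h2, List.all_append]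
  simp

theorem nodropB_self (prices : List Int) (i : Nat) : nodropB prices i (i+1) = true := by
  unfold nodropB
  have h1 : i + 1 - (i+1) = 0 := by omega
  rw [h1, List.range'_zero]
  rfl

theorem mem_stInv (prices : List Int) (i j : Nat) :
    j ∈ stInv prices i ↔ j < i ∧ nodropB prices j i = true := by
  simp [stInv, List.mem_filter, List.mem_range]

theorem stInv_pairwise_gt (prices : List Int) (i : Nat) :
    (stInv prices i).Pairwise (· > ·) := by
  unfold stInv
  rw [List.pairwise_reverse]
  exact List.Pairwise.filter _ List.pairwise_lt_range

theorem stInv_nodup (prices : List Int) (i : Nat) : (stInv prices i).Nodup :=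
  (stInv_pairwise_gt prices i).imp (fun h => ne_of_gt h)

theorem ansInv_length (prices : List Int) (n i : Nat) : (ansInv prices n i).length = n := by
  simp [ansInv]

theorem ansInv_getD (prices : List Int) (n i k : Nat) (hk : k < n) :
    (ansInv prices n i).getD k 0 =
      if k < i ∧ nodropB prices k i = false then specv prices k else 0 := by
  unfold ansInv
  rw [List.getD_eq_getElem?_getD, List.getElem?_map, List.getElem?_range hk]
  rfl

theorem specv_at_drop (prices : List Int) (j i : Nat) (hj : j < i) (hi : i < prices.length)
    (hnd : nodropB prices j i = true) (hdrop : prices.getD i 0 < prices.getD j 0) :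
    specv prices j = (i : Int) - (j : Int) := by
  unfold specv
  have hsplit := List.range'_append (s := j+1) (m := i-(j+1)) (n := prices.length - i) (step := 1)
  rw [show j+1+1*(i-(j+1)) = i by omega,
    show (i-(j+1)) + (prices.length - i) = prices.length - (j+1) by omega] at hsplit
  rw [← hsplit, List.find?_append]
  have h1 : List.find? (fun k => decide (prices.getD k 0 < prices.getD j 0))
      (List.range' (j+1) (i-(j+1))) = none := by
    rw [List.find?_eq_none]
    intro k hk
    rw [List.mem_range'_1] at hk
    simp only [decide_eq_true_eq, not_lt]
    exact nodropB_le prices j i k hnd (by omega) (by omega)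
  have hlen : prices.length - i = (prices.length - i - 1) + 1 := by omega
  rw [h1, hlen, List.range'_succ, List.find?_cons_of_pos (by simpa using hdrop)]
  rfl

theorem specv_none (prices : List Int) (j : Nat) (hj : j < prices.length)
    (hnd : nodropB prices j prices.length = true) :
    specv prices j = (prices.length : Int) - 1 - (j : Int) := by
  unfold specv
  have h1 : List.find? (fun k => decide (prices.getD k 0 < prices.getD j 0))
      (List.range' (j+1) (prices.length - (j+1))) = none := by
    rw [List.find?_eq_none]
    intro k hk
    rw [List.mem_range'_1] at hk
    simp only [decide_eq_true_eq, not_lt]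
    exact nodropB_le prices j prices.length k hnd (by omega) (by omega)
  rw [h1]

theorem foldlB (prices : List Int) :
    ∀ i, i ≤ prices.length →
    (List.range i).foldl (fun (st : List Nat × List Int) i =>
        let res := popLoop prices i (prices.getD i 0) st.1 st.2
        (i :: res.1, res.2)) ([], List.replicate prices.length 0)
      = (stInv prices i, ansInv prices prices.length i) := by
  intro i
  induction i with
  | zero =>
    intro _
    refine Prod.ext (by simp [stInv]) ?_
    show List.replicate prices.length 0 = ansInv prices prices.length 0
    unfold ansInv
    simp [List.map_const']
  | succ i ih =>
    intro hi1
    have hi : i < prices.length := by omega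
    rw [List.range_succ, List.foldl_append, ih (by omega)]
    simp only [List.foldl_cons, List.foldl_nil]
    rw [popLoop_tw]
    have hpair : (stInv prices i).Pairwise
        (fun a b => (fun j => decide (prices.getD j 0 > prices.getD i 0)) a = false →
          (fun j => decide (prices.getD j 0 > prices.getD i 0)) b = false) := by
      refine List.Pairwise.imp_of_mem ?_ (stInv_pairwise_gt prices i)
      intro a b hma hmb hab hfa
      simp only [decide_eq_false_iff_not, not_lt] at hfa ⊢
      rcases (mem_stInv prices i b).mp hmb with ⟨hbi, hnb⟩
      exact le_trans (nodropB_le prices b i a hnb hab ((mem_stInv prices i a).mp hma).1) hfa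
    obtain ⟨hdw, htw⟩ := dw_tw_filter _ (stInv prices i) hpair
    rw [hdw, htw]
    refine Prod.ext ?_ ?_
    · -- stack component
      show i :: (stInv prices i).filter _ = stInv prices (i+1)
      unfold stInv
      have hfi : List.filter (fun j => nodropB prices j (i+1)) [i] = [i] := by
        simp [nodropB_self prices i]
      rw [List.range_succ, List.filter_append, hfi,
        List.reverse_append, List.filter_reverse, List.filter_filter]
      simp only [List.reverse_cons, List.reverse_nil, List.nil_append, List.cons_append,
        List.nil_append]
      congr 1
      congr 1
      apply List.filter_congr
      intro j hj
      rw [List.mem_range] at hj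
      rw [nodropB_succ prices j i hj, Bool.and_comm]
      rcases le_or_gt (prices.getD j 0) (prices.getD i 0) with h | h
      · rw [decide_eq_false (not_lt.mpr h), decide_eq_true h, Bool.not_false]
      · rw [decide_eq_true h, decide_eq_false (not_le.mpr h), Bool.not_true]
    · -- answer component
      show ((stInv prices i).filter _).foldl _ (ansInv prices prices.length i)
          = ansInv prices prices.length (i+1)
      apply List.ext_getElem
      · rw [foldl_set_length (fun j => (i : Int) - (j : Int)), ansInv_length, ansInv_length]
      · intro k h1 h2
        rw [foldl_set_length (fun j => (i : Int) - (j : Int)), ansInv_length] at h1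
        rw [← List.getD_eq_getElem _ 0, ← List.getD_eq_getElem _ 0,
          foldl_set_getD (fun j => (i : Int) - (j : Int)) _ _ _
            (List.Nodup.filter _ (stInv_nodup prices i)) (by rw [ansInv_length]; exact h1),
          ansInv_getD prices _ _ _ h1, ansInv_getD prices _ _ _ h1]
        by_cases hin : k ∈ (stInv prices i).filter (fun j => decide (prices.getD j 0 > prices.getD i 0))
        · rcases List.mem_filter.mp hin with ⟨hmem, hfk⟩
          rcases (mem_stInv prices i k).mp hmem with ⟨hki, hnb⟩
          have hdrop : prices.getD i 0 < prices.getD k 0 := by simpa using hfk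
          rw [if_pos hin, if_pos ⟨by omega, by
            rw [nodropB_succ prices k i hki, hnb, decide_eq_false (not_le.mpr hdrop)]
            rfl⟩,
            specv_at_drop prices k i hki hi hnb hdrop]
        · rw [if_neg hin]
          by_cases h3 : k < i ∧ nodropB prices k i = false
          · rw [if_pos h3, if_pos ⟨by omega, by rw [nodropB_succ prices k i h3.1]; simp [h3.2]⟩]
          · rw [if_neg h3, if_neg ?_]
            rintro ⟨hki1, hnb1⟩
            rcases Nat.lt_or_ge k i with hki | hki
            · have hnb : nodropB prices k i = true := by
                rcases Bool.eq_false_or_eq_true (nodropB prices k i) with h | h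
                · exact h
                · exact absurd ⟨hki, h⟩ h3
              have hfk : ¬ (decide (prices.getD k 0 > prices.getD i 0) = true) := by
                intro hfk
                exact hin (List.mem_filter.mpr ⟨(mem_stInv prices i k).mpr ⟨hki, hnb⟩, hfk⟩)
              rw [nodropB_succ prices k i hki, hnb] at hnb1
              simp only [decide_eq_true_eq, not_lt] at hfk
              rw [Bool.true_and, decide_eq_false_iff_not] at hnb1
              exact hnb1 hfk
            · have : k = i := by omega
              subst this
              rw [nodropB_self prices k] at hnb1
              exact absurd hnb1 (by simp)

theorem solution_alt_eq_spec (prices : List Int) :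
    solution_alt prices = (List.range prices.length).map (specv prices) := by
  simp only [solution_alt]
  rw [foldlB prices prices.length (le_refl _)]
  dsimp only
  apply List.ext_getElem
  · rw [foldl_set_length (fun j => (prices.length : Int) - 1 - (j : Int)), ansInv_length,
      List.length_map, List.length_range]
  · intro k h1 h2
    rw [foldl_set_length (fun j => (prices.length : Int) - 1 - (j : Int)), ansInv_length] at h1
    have hrhs : (List.map (specv prices) (List.range prices.length)).getD k 0 = specv prices k := by
      rw [List.getD_eq_getElem?_getD, List.getElem?_map, List.getElem?_range h1]
      rfl
    rw [← List.getD_eq_getElem _ 0, ← List.getD_eq_getElem _ 0, hrhs,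
      foldl_set_getD (fun j => (prices.length : Int) - 1 - (j : Int)) _ _ _
        (stInv_nodup prices prices.length) (by rw [ansInv_length]; exact h1)]
    by_cases hin : k ∈ stInv prices prices.length
    · rcases (mem_stInv prices prices.length k).mp hin with ⟨hk, hnb⟩
      rw [if_pos hin, specv_none prices k hk hnb]
    · rw [if_neg hin, ansInv_getD prices _ _ _ h1]
      have hnb : nodropB prices k prices.length = false := by
        rcases Bool.eq_false_or_eq_true (nodropB prices k prices.length) with h | h
        · exact absurd ((mem_stInv prices prices.length k).mpr ⟨h1, h⟩) hin
        · exact h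
      rw [if_pos ⟨h1, hnb⟩]

-- ===== VERDICT (by name: the statement is the Claim_ definition above) =====
theorem solution_spec : Claim_equal_solution := by
  intro prices _
  unfold Spec_solution
  rw [solution_eq_spec, solution_alt_eq_spec]
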